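-- pv_equiv track=rewrite | github.com/shahinxu/Scale-Sparse-Autoencoder | test-combination.py | histogram_overlap_counts
-- ===== SOURCE A (Python) =====
-- from typing import Dict, List, Optional, Sequence, Tuple
--
-- def histogram_overlap_counts(sets: List[set], n: int) -> List[int]:
--     hist = [0] * (n + 1)
--     m = len(sets)
--     for i in range(m):
--         si = sets[i]
--         for j in range(i + 1, m):
--             ov = len(si & sets[j])
--             if 0 <= ov <= n:
--                 hist[ov] += 1
--     return hist
-- ===== SOURCE B (Python) =====
-- def histogram_overlap_counts(sets, n):
--     # Inverted index + dense co-occurrence array: for each element, the list of sets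
--     # containing it; each occurrence list bumps the flat m*m counter at i*m+j (i < j);
--     # hist[0] is derived by complement from C(m, 2). No set intersection is computed.
--     m = len(sets)
--     index = {}
--     for i, s in enumerate(sets):
--         for x in s:
--             index.setdefault(x, []).append(i)
--     co = [0] * (m * m)
--     for ids in index.values():
--         for a in range(len(ids) - 1):
--             base = ids[a] * m
--             for j in ids[a + 1:]:
--                 co[base + j] += 1
--     hist = [0] * (n + 1)
--     pos = 0
--     for c in co:
--         if c > 0:
--             pos += 1
--             if c <= n:
--                 hist[c] += 1
--     if n >= 0:
--         hist[0] = m * (m - 1) // 2 - pos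
--     return hist
-- ===== Notes on version B (the rewrite author's own statement) =====
-- stated objective: faster
-- what changed: A intersects every pair of sets inside nested index loops; B never computes an intersection: it builds an inverted index (element -> list of sets containing it), bumps a flat m*m co-occurrence counter at i*m+j for each pair drawn from an element's occurrence list, reads the positive histogram slots off that counter, and derives hist[0] by complement from C(m,2).
import Mathlib
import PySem

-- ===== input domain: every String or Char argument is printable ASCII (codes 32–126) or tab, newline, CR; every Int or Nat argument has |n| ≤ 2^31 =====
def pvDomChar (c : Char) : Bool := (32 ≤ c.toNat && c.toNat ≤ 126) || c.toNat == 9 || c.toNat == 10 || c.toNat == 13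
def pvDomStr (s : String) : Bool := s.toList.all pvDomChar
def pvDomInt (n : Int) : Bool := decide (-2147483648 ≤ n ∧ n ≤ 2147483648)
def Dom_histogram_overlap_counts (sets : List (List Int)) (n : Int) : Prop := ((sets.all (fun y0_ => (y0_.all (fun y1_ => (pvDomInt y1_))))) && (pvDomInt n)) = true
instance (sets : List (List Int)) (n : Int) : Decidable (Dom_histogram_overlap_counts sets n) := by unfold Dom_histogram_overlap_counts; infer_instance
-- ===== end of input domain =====

-- B replaces A's pairwise intersection scan by an inverted index (element -> sets containing it),
-- accumulating per-pair co-occurrence counts and deriving hist[0] by complement; objective: faster on sparse inputs.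

-- ===== PORT A =====
def histogram_overlap_counts (sets : List (List Int)) (n : Int) : List Int :=
  let hist : List Int := List.replicate (n + 1).toNat 0
  let m : Int := sets.length
  (PySem.List.pyRange 0 m 1).foldl (fun hist i =>
    let si := PySem.List.pyGetD sets i []
    (PySem.List.pyRange (i + 1) m 1).foldl (fun hist j =>
      let ov : Int := (PySem.Set.inter si (PySem.List.pyGetD sets j [])).length
      if 0 ≤ ov ∧ ov ≤ n then
        PySem.List.pySetD hist ov (PySem.List.pyGetD hist ov 0 + 1)
      else hist) hist) hist

-- ===== PORT B =====
def histogram_overlap_counts_alt (sets : List (List Int)) (n : Int) : List Int :=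
  let m : Int := sets.length
  let index : PySem.Dict Int (List Int) :=
    (PySem.List.enumerate sets).foldl (fun d p =>
      p.2.foldl (fun d x => d.modify x [] (fun l => l ++ [p.1])) d) PySem.Dict.empty
  let co : List Int := List.replicate (m * m).toNat 0
  let co : List Int :=
    index.values.foldl (fun co ids =>
      (PySem.List.pyRange 0 ((ids.length : Int) - 1) 1).foldl (fun co a =>
        let base : Int := PySem.List.pyGetD ids a 0 * m
        (PySem.List.slice ids (some (a + 1)) none).foldl (fun co j =>
          PySem.List.pySetD co (base + j) (PySem.List.pyGetD co (base + j) 0 + 1)) co) co) co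
  let hist : List Int := List.replicate (n + 1).toNat 0
  let state : Int × List Int :=
    co.foldl (fun s c =>
      (if 0 < c then s.1 + 1 else s.1,
       if 0 < c ∧ c ≤ n then PySem.List.pySetD s.2 c (PySem.List.pyGetD s.2 c 0 + 1) else s.2))
      ((0 : Int), hist)
  let pos : Int := state.1
  let hist : List Int := state.2
  let hist : List Int :=
    if 0 ≤ n then
      PySem.List.pySetD hist 0 (PySem.Int.floordiv (m * (m - 1)) 2 - pos)
    else hist
  hist

-- ===== PRECONDITION & SPEC =====
-- The Python parameter is a list of *sets*; under the type convention a set is a list of DISTINCT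
-- elements, so Pre_ excludes inner lists that repeat an element — those encode no Python input at all
-- (Python A receives sets and cannot be called on a list with duplicates).
def Pre_histogram_overlap_counts (sets : List (List Int)) (n : Int) : Prop :=
  ∀ s ∈ sets, s.Nodup
instance (sets : List (List Int)) (n : Int) : Decidable (Pre_histogram_overlap_counts sets n) := by
  unfold Pre_histogram_overlap_counts; infer_instance
def pvWitness_histogram_overlap_counts : List (List Int) × Int := ([[1, 2], [2, 3]], 2)

def Spec_histogram_overlap_counts (sets : List (List Int)) (n : Int) (out : List Int) : Prop := out = histogram_overlap_counts_alt sets n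
instance (sets : List (List Int)) (n : Int) (out : List Int) : Decidable (Spec_histogram_overlap_counts sets n out) := by unfold Spec_histogram_overlap_counts; infer_instance

-- ===== CLAIM (what is proved, stated in full; the proofs are below) =====
def Claim_equal_histogram_overlap_counts : Prop := ∀ (sets : List (List Int)) (n : Int), Dom_histogram_overlap_counts sets n → Pre_histogram_overlap_counts sets n → Spec_histogram_overlap_counts sets n (histogram_overlap_counts sets n)

-- ===== LEMMAS AND PROOFS =====

-- all ordered pairs (earlier, later) of a list, in A's traversal order
def pvCombs2 {α : Type} : List α → List (α × α)
  | [] => []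
  | x :: xs => xs.map (fun y => (x, y)) ++ pvCombs2 xs

def pvOv (p : List Int × List Int) : Int := (PySem.Set.inter p.1 p.2).length

-- nested index loops over a list, flattened to pvCombs2
lemma pv_drop_flat {α β : Type} (f : α → α → β) (d : α) :
    ∀ (xs : List α),
      (List.range xs.length).flatMap (fun i => (xs.drop (i + 1)).map (f (xs.getD i d)))
      = (pvCombs2 xs).map (fun p => f p.1 p.2) := by
  intro xs
  induction xs with
  | nil => rfl
  | cons x t ih =>
    simp only [List.length_cons, List.range_succ_eq_map, List.flatMap_cons, List.flatMap_map,
      List.drop_succ_cons, List.getD_cons_succ, List.getD_cons_zero, List.drop_zero, pvCombs2,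
      List.map_append, List.map_map]
    rw [← ih]
    rfl

lemma pv_inner {α β : Type} (f : α → α → β) (d : α) (xs : List α) (i : Nat) :
    (PySem.List.pyRange ((i : Int) + 1) (xs.length : Int) 1).map
        (fun j => f (PySem.List.pyGetD xs (i : Int) d) (PySem.List.pyGetD xs j d))
      = (xs.drop (i + 1)).map (f (xs.getD i d)) := by
  rw [PySem.List.pyGetD_natCast]
  rw [show (fun j => f (xs.getD i d) (PySem.List.pyGetD xs j d))
      = (f (xs.getD i d)) ∘ (fun j => PySem.List.pyGetD xs j d) from rfl]
  rw [← List.map_map, PySem.List.map_pyGetD_pyRange' xs d (a := (i : Int) + 1) (by positivity)]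
  norm_num

lemma pv_idx_flat {α β : Type} (f : α → α → β) (d : α) (xs : List α) :
      (PySem.List.pyRange 0 (xs.length : Int) 1).flatMap
        (fun i => (PySem.List.pyRange (i + 1) (xs.length : Int) 1).map
          (fun j => f (PySem.List.pyGetD xs i d) (PySem.List.pyGetD xs j d)))
      = (pvCombs2 xs).map (fun p => f p.1 p.2) := by
  rw [PySem.List.pyRange_zero_natCast, List.flatMap_map]
  rw [← pv_drop_flat f d xs]
  exact List.flatMap_congr (fun i _ => pv_inner f d xs i)

lemma pv_foldl_foldl {α β γ : Type} (L : List α) (g : α → List β) (f : γ → β → γ) (init : γ) :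
    L.foldl (fun acc a => (g a).foldl f acc) init = (L.flatMap g).foldl f init := by
  induction L generalizing init with
  | nil => rfl
  | cons x xs ih => simp [List.flatMap_cons, List.foldl_append, ih]

-- the body of A's inner loop, named for the proofs
def pvStep (n : Int) (hist : List Int) (ov : Int) : List Int :=
  if 0 ≤ ov ∧ ov ≤ n then
    PySem.List.pySetD hist ov (PySem.List.pyGetD hist ov 0 + 1)
  else hist

lemma pvStep_length (n : Int) (h : List Int) (v : Int) : (pvStep n h v).length = h.length := by
  unfold pvStep; split_ifs with hv
  · simp [PySem.List.length_pySetD]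
  · rfl

lemma pv_fold_length (n : Int) (L : List Int) (h : List Int) :
    (L.foldl (pvStep n) h).length = h.length := by
  induction L generalizing h with
  | nil => rfl
  | cons v L ih => simp [List.foldl_cons, ih, pvStep_length]

lemma pvStep_getD (n : Int) (h : List Int) (v : Int) (k : Nat)
    (hlen : h.length = (n + 1).toNat) (hk : k < h.length) :
    (pvStep n h v).getD k 0 = h.getD k 0 + (if v = (k : Int) then 1 else 0) := by
  have hkn : (k : Int) ≤ n := by omega
  unfold pvStep
  split_ifs with hv hvk hvk
  · rw [hvk] at *
    rw [PySem.List.pySetD_of_nonneg _ _ (by positivity)]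
    simp [PySem.List.pyGetD_natCast, List.getD_eq_getElem?_getD, List.getElem?_set_self',
      List.getElem?_eq_getElem hk]
  · rw [PySem.List.pySetD_of_nonneg _ _ hv.1]
    have : v.toNat ≠ k := by omega
    simp [List.getD_eq_getElem?_getD, List.getElem?_set_ne this]
  · omega
  · simp

lemma pv_fold_getD (n : Int) (L : List Int) (h : List Int) (k : Nat)
    (hlen : h.length = (n + 1).toNat) (hk : k < h.length) :
    (L.foldl (pvStep n) h).getD k 0 = h.getD k 0 + (L.count (k : Int) : Int) := by
  induction L generalizing h with
  | nil => simp
  | cons v L ih =>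
    rw [List.foldl_cons, ih _ (by rw [pvStep_length]; exact hlen) (by rw [pvStep_length]; exact hk),
      pvStep_getD n h v k hlen hk, List.count_cons]
    by_cases hvk : v = (k : Int)
    · simp [hvk]
      ring
    · simp [hvk]

-- A's port, flattened to one fold over the ordered pairs
lemma pvA_eq (sets : List (List Int)) (n : Int) :
    histogram_overlap_counts sets n
      = ((pvCombs2 sets).map pvOv).foldl (pvStep n) (List.replicate (n + 1).toNat 0) := by
  show (PySem.List.pyRange 0 (sets.length : Int) 1).foldl (fun h i =>
      (PySem.List.pyRange (i + 1) (sets.length : Int) 1).foldl (fun h j =>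
        pvStep n h (pvOv (PySem.List.pyGetD sets i [], PySem.List.pyGetD sets j []))) h)
      (List.replicate (n + 1).toNat 0) = _
  have hinner : ∀ (i : Int) (h : List Int),
      (PySem.List.pyRange (i + 1) (sets.length : Int) 1).foldl (fun h j =>
        pvStep n h (pvOv (PySem.List.pyGetD sets i [], PySem.List.pyGetD sets j []))) h
      = ((PySem.List.pyRange (i + 1) (sets.length : Int) 1).map
          (fun j => pvOv (PySem.List.pyGetD sets i [], PySem.List.pyGetD sets j []))).foldl
          (pvStep n) h := by
    intro i h; rw [List.foldl_map]
  calc (PySem.List.pyRange 0 (sets.length : Int) 1).foldl (fun h i =>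
        (PySem.List.pyRange (i + 1) (sets.length : Int) 1).foldl (fun h j =>
          pvStep n h (pvOv (PySem.List.pyGetD sets i [], PySem.List.pyGetD sets j []))) h)
        (List.replicate (n + 1).toNat 0)
      = (PySem.List.pyRange 0 (sets.length : Int) 1).foldl (fun h i =>
          (((PySem.List.pyRange (i + 1) (sets.length : Int) 1).map
            (fun j => pvOv (PySem.List.pyGetD sets i [], PySem.List.pyGetD sets j [])))).foldl
            (pvStep n) h) (List.replicate (n + 1).toNat 0) := by
        exact congrFun (congrArg (fun f => List.foldl f (List.replicate (n + 1).toNat 0))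
          (funext fun h => funext fun i => hinner i h)) _
    _ = ((PySem.List.pyRange 0 (sets.length : Int) 1).flatMap (fun i =>
          (PySem.List.pyRange (i + 1) (sets.length : Int) 1).map
            (fun j => pvOv (PySem.List.pyGetD sets i [], PySem.List.pyGetD sets j [])))).foldl
          (pvStep n) (List.replicate (n + 1).toNat 0) := by
        rw [pv_foldl_foldl]
    _ = ((pvCombs2 sets).map pvOv).foldl (pvStep n) (List.replicate (n + 1).toNat 0) := by
        rw [pv_idx_flat (fun a b => pvOv (a, b)) [] sets]

-- B's canonical pieces
def pvL0 (sets : List (List Int)) : List (Int × Int) :=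
  (PySem.List.enumerate sets).flatMap (fun p => p.2.map (fun x => (x, p.1)))

def pvIndex (sets : List (List Int)) : PySem.Dict Int (List Int) :=
  (pvL0 sets).foldl (fun d q => d.modify q.1 [] (fun l => l ++ [q.2])) PySem.Dict.empty

def pvL (sets : List (List Int)) : List (Int × Int) :=
  (pvIndex sets).values.flatMap pvCombs2

-- the encoded pair key i*m + j that B uses in its co-occurrence dict
def pvEnc (sets : List (List Int)) (p : Int × Int) : Int := p.1 * (sets.length : Int) + p.2

def pvLE (sets : List (List Int)) : List Int := (pvL sets).map (pvEnc sets)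

def pvArrStep (co : List Int) (e : Int) : List Int :=
  PySem.List.pySetD co e (PySem.List.pyGetD co e 0 + 1)

def pvCoArr (sets : List (List Int)) : List Int :=
  (pvLE sets).foldl pvArrStep
    (List.replicate ((sets.length : Int) * (sets.length : Int)).toNat 0)

def pvStepC (n : Int) (h : List Int) (c : Int) : List Int :=
  if 0 < c ∧ c ≤ n then PySem.List.pySetD h c (PySem.List.pyGetD h c 0 + 1) else h

def pvPos (sets : List (List Int)) : Int :=
  (pvCoArr sets).foldl (fun p c => if 0 < c then p + 1 else p) 0

def pvHist (sets : List (List Int)) (n : Int) : List Int :=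
  (pvCoArr sets).foldl (pvStepC n) (List.replicate (n + 1).toNat 0)

-- the slice-based inner loops of B, flattened (the last index contributes nothing)
lemma pv_slice_flat {α β : Type} (f : α → α → β) (d : α) (xs : List α) :
    (PySem.List.pyRange 0 ((xs.length : Int) - 1) 1).flatMap (fun a =>
        (PySem.List.slice xs (some (a + 1)) none).map (fun j => f (PySem.List.pyGetD xs a d) j))
      = (pvCombs2 xs).map (fun p => f p.1 p.2) := by
  cases xs with
  | nil => rfl
  | cons y t =>
    have h1 : ((y :: t).length : Int) - 1 = (t.length : Int) := by
      simp
    rw [h1, PySem.List.pyRange_zero_natCast, List.flatMap_map]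
    have hterm : ∀ i ∈ List.range t.length,
        (PySem.List.slice (y :: t) (some ((i : Int) + 1)) none).map
            (fun j => f (PySem.List.pyGetD (y :: t) (i : Int) d) j)
          = ((y :: t).drop (i + 1)).map (f ((y :: t).getD i d)) := by
      intro i _
      rw [show ((i : Int) + 1) = ((i + 1 : Nat) : Int) by push_cast; ring]
      rw [PySem.List.slice_from _ (by positivity), PySem.List.pyGetD_natCast]
      norm_num
    rw [List.flatMap_congr hterm]
    have hfull := pv_drop_flat f d (y :: t)
    rw [List.length_cons, List.range_succ, List.flatMap_append, List.flatMap_cons,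
      List.flatMap_nil, List.append_nil] at hfull
    have hlast : ((y :: t).drop (t.length + 1)).map (f ((y :: t).getD t.length d)) = [] := by
      rw [show t.length + 1 = (y :: t).length from rfl, List.drop_length, List.map_nil]
    rw [hlast, List.append_nil] at hfull
    exact hfull

lemma pvB_eq (sets : List (List Int)) (n : Int) :
    histogram_overlap_counts_alt sets n
      = (if 0 ≤ n then
          PySem.List.pySetD (pvHist sets n) 0
            (PySem.Int.floordiv ((sets.length : Int) * ((sets.length : Int) - 1)) 2
              - pvPos sets)
        else pvHist sets n) := by
  have hidx : (PySem.List.enumerate sets).foldl (fun d p =>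
      p.2.foldl (fun d x => d.modify x [] (fun l => l ++ [p.1])) d) PySem.Dict.empty
      = pvIndex sets := by
    unfold pvIndex pvL0
    rw [← pv_foldl_foldl]
    exact PySem.List.foldl_congr_mem _ _ _ _ (fun acc p _ => by rw [List.foldl_map])
  have hco : (pvIndex sets).values.foldl (fun co ids =>
      (PySem.List.pyRange 0 ((ids.length : Int) - 1) 1).foldl (fun co a =>
        (PySem.List.slice ids (some (a + 1)) none).foldl (fun co j =>
          PySem.List.pySetD co (PySem.List.pyGetD ids a 0 * (sets.length : Int) + j)
            (PySem.List.pyGetD co (PySem.List.pyGetD ids a 0 * (sets.length : Int) + j) 0 + 1)) co) co)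
      (List.replicate ((sets.length : Int) * (sets.length : Int)).toNat (0 : Int))
      = pvCoArr sets := by
    unfold pvCoArr pvLE pvL
    rw [List.map_flatMap, ← pv_foldl_foldl]
    refine PySem.List.foldl_congr_mem _ _ _ _ (fun co ids _ => ?_)
    calc (PySem.List.pyRange 0 ((ids.length : Int) - 1) 1).foldl (fun co a =>
          (PySem.List.slice ids (some (a + 1)) none).foldl (fun co j =>
            PySem.List.pySetD co (PySem.List.pyGetD ids a 0 * (sets.length : Int) + j)
              (PySem.List.pyGetD co (PySem.List.pyGetD ids a 0 * (sets.length : Int) + j) 0 + 1)) co) co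
        = (PySem.List.pyRange 0 ((ids.length : Int) - 1) 1).foldl (fun co a =>
            ((PySem.List.slice ids (some (a + 1)) none).map
              (fun j => PySem.List.pyGetD ids a 0 * (sets.length : Int) + j)).foldl
              pvArrStep co) co := by
          exact PySem.List.foldl_congr_mem _ _ _ _ (fun co a _ => by rw [List.foldl_map]; rfl)
      _ = ((PySem.List.pyRange 0 ((ids.length : Int) - 1) 1).flatMap (fun a =>
            (PySem.List.slice ids (some (a + 1)) none).map
              (fun j => PySem.List.pyGetD ids a 0 * (sets.length : Int) + j))).foldl
            pvArrStep co := by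
          rw [pv_foldl_foldl]
      _ = ((pvCombs2 ids).map (fun p => pvEnc sets p)).foldl pvArrStep co := by
          rw [pv_slice_flat (fun u j => u * (sets.length : Int) + j) 0 ids]
          rfl
  have hfull : histogram_overlap_counts_alt sets n
      = (let coA := ((PySem.List.enumerate sets).foldl (fun d p =>
            p.2.foldl (fun d x => d.modify x [] (fun l => l ++ [p.1])) d)
            PySem.Dict.empty).values.foldl (fun co ids =>
          (PySem.List.pyRange 0 ((ids.length : Int) - 1) 1).foldl (fun co a =>
            (PySem.List.slice ids (some (a + 1)) none).foldl (fun co j =>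
              PySem.List.pySetD co (PySem.List.pyGetD ids a 0 * (sets.length : Int) + j)
                (PySem.List.pyGetD co (PySem.List.pyGetD ids a 0 * (sets.length : Int) + j) 0 + 1)) co) co)
          (List.replicate ((sets.length : Int) * (sets.length : Int)).toNat (0 : Int))
        let st := coA.foldl (fun s c =>
          (if 0 < c then s.1 + 1 else s.1,
           if 0 < c ∧ c ≤ n then PySem.List.pySetD s.2 c (PySem.List.pyGetD s.2 c 0 + 1) else s.2))
          ((0 : Int), List.replicate (n + 1).toNat 0)
        if 0 ≤ n then
          PySem.List.pySetD st.2 0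
            (PySem.Int.floordiv ((sets.length : Int) * ((sets.length : Int) - 1)) 2 - st.1)
        else st.2) := by
    unfold histogram_overlap_counts_alt
    rfl
  rw [hfull]
  simp only [hidx, hco]
  rw [PySem.List.foldl_prod_mk (f := fun acc c => if 0 < c then acc + 1 else acc)
    (g := fun acc c =>
      if 0 < c ∧ c ≤ n then PySem.List.pySetD acc c (PySem.List.pyGetD acc c 0 + 1) else acc)]
  rfl

-- length and slot lemmas for B's array and histogram folds
lemma pvArrStep_length (h : List Int) (v : Int) : (pvArrStep h v).length = h.length := by
  unfold pvArrStep; rw [PySem.List.length_pySetD]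

lemma pvArr_fold_length (L : List Int) (h : List Int) :
    (L.foldl pvArrStep h).length = h.length := by
  induction L generalizing h with
  | nil => rfl
  | cons v L ih => rw [List.foldl_cons, ih, pvArrStep_length]

lemma pvArrStep_getD (h : List Int) (v : Int) (t : Nat)
    (hv : 0 ≤ v) (ht : t < h.length) :
    (pvArrStep h v).getD t 0 = h.getD t 0 + (if v = (t : Int) then 1 else 0) := by
  unfold pvArrStep
  rw [PySem.List.pySetD_of_nonneg _ _ hv]
  by_cases hvt : v = (t : Int)
  · rw [if_pos hvt]
    have : v.toNat = t := by omega
    rw [this]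
    simp [PySem.List.pyGetD_natCast, List.getD_eq_getElem?_getD, List.getElem?_set_self',
      List.getElem?_eq_getElem ht, hvt]
  · rw [if_neg hvt]
    have : v.toNat ≠ t := by omega
    simp [List.getD_eq_getElem?_getD, List.getElem?_set_ne this]

lemma pvArr_fold_getD (L : List Int) (h : List Int) (t : Nat)
    (ht : t < h.length) (hkeys : ∀ e ∈ L, 0 ≤ e ∧ e < (h.length : Int)) :
    (L.foldl pvArrStep h).getD t 0 = h.getD t 0 + (L.count (t : Int) : Int) := by
  induction L generalizing h with
  | nil => simp
  | cons v L ih =>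
    have hv := hkeys v List.mem_cons_self
    rw [List.foldl_cons,
      ih _ (by rw [pvArrStep_length]; exact ht)
        (fun e he => by rw [pvArrStep_length]; exact hkeys e (List.mem_cons_of_mem _ he)),
      pvArrStep_getD h v t hv.1 ht, List.count_cons]
    by_cases hvt : v = (t : Int)
    · simp [hvt]
      ring
    · simp [hvt]

lemma pvStepC_length (n : Int) (h : List Int) (v : Int) : (pvStepC n h v).length = h.length := by
  unfold pvStepC; split_ifs
  · rw [PySem.List.length_pySetD]
  · rfl

lemma pvC_fold_length (n : Int) (L : List Int) (h : List Int) :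
    (L.foldl (pvStepC n) h).length = h.length := by
  induction L generalizing h with
  | nil => rfl
  | cons v L ih => rw [List.foldl_cons, ih, pvStepC_length]

lemma pvStepC_getD (n : Int) (h : List Int) (v : Int) (k : Nat)
    (hlen : h.length = (n + 1).toNat) (hk : k < h.length) :
    (pvStepC n h v).getD k 0 = h.getD k 0 + (if v = (k : Int) ∧ 1 ≤ k then 1 else 0) := by
  have hkn : (k : Int) ≤ n := by omega
  unfold pvStepC
  split_ifs with hv hvk hvk
  · obtain ⟨hvk1, _⟩ := hvk
    rw [hvk1] at *
    rw [PySem.List.pySetD_of_nonneg _ _ (by positivity)]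
    simp [PySem.List.pyGetD_natCast, List.getD_eq_getElem?_getD, List.getElem?_set_self',
      List.getElem?_eq_getElem hk]
  · rw [PySem.List.pySetD_of_nonneg _ _ (le_of_lt hv.1)]
    have hne : v ≠ (k : Int) := by
      intro hveq
      exact hvk ⟨hveq, by omega⟩
    have : v.toNat ≠ k := by omega
    simp [List.getD_eq_getElem?_getD, List.getElem?_set_ne this]
  · obtain ⟨hvk1, hvk2⟩ := hvk
    omega
  · simp

lemma pvC_fold_getD (n : Int) (L : List Int) (h : List Int) (k : Nat)
    (hlen : h.length = (n + 1).toNat) (hk : k < h.length) :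
    (L.foldl (pvStepC n) h).getD k 0
      = h.getD k 0 + (if 1 ≤ k then (L.count (k : Int) : Int) else 0) := by
  induction L generalizing h with
  | nil => simp
  | cons v L ih =>
    rw [List.foldl_cons,
      ih _ (by rw [pvStepC_length]; exact hlen) (by rw [pvStepC_length]; exact hk),
      pvStepC_getD n h v k hlen hk, List.count_cons]
    by_cases hk1 : 1 ≤ k
    · by_cases hvk : v = (k : Int)
      · simp [hvk, hk1]
        ring
      · simp [hvk, hk1]
    · simp [hk1]

-- ordered pairs of a strictly increasing list: nodup, membership characterization
lemma pvCombs2_spec : ∀ {xs : List Int}, xs.Pairwise (· < ·) →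
    (pvCombs2 xs).Nodup ∧ ∀ p : Int × Int, (p ∈ pvCombs2 xs ↔ p.1 ∈ xs ∧ p.2 ∈ xs ∧ p.1 < p.2) := by
  intro xs
  induction xs with
  | nil => intro _; simp [pvCombs2]
  | cons x t ih =>
    intro h
    have hx : ∀ y ∈ t, x < y := (List.pairwise_cons.mp h).1
    have ht : t.Pairwise (· < ·) := h.of_cons
    obtain ⟨ihn, ihm⟩ := ih ht
    have htnd : t.Nodup := ht.imp ne_of_lt
    constructor
    · rw [pvCombs2, List.nodup_append]
      refine ⟨htnd.map (fun a b hab => (Prod.mk.injEq _ _ _ _).mp hab |>.2), ihn,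
        fun p hp q hq hpq => ?_⟩
      subst hpq
      obtain ⟨y, hy, rfl⟩ := List.mem_map.mp hp
      exact absurd (hx _ (((ihm (x, y)).mp hq).1)) (lt_irrefl x)
    · intro p
      rw [pvCombs2, List.mem_append, List.mem_map, ihm]
      constructor
      · rintro (⟨y, hy, rfl⟩ | ⟨h1, h2, h3⟩)
        · exact ⟨List.mem_cons_self, List.mem_cons_of_mem _ hy, hx _ hy⟩
        · exact ⟨List.mem_cons_of_mem _ h1, List.mem_cons_of_mem _ h2, h3⟩
      · rintro ⟨h1, h2, h3⟩
        rcases List.mem_cons.mp h1 with rfl | h1'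
        · rcases List.mem_cons.mp h2 with h2' | h2'
          · exact absurd h3 (by rw [← h2']; exact lt_irrefl _)
          · exact Or.inl ⟨p.2, h2', rfl⟩
        · rcases List.mem_cons.mp h2 with rfl | h2'
          · exact absurd h3 (not_lt_of_gt (hx _ h1'))
          · exact Or.inr ⟨h1', h2', h3⟩

lemma pvCombs2_map {α β : Type} (f : α → β) :
    ∀ (xs : List α), pvCombs2 (xs.map f) = (pvCombs2 xs).map (fun p => (f p.1, f p.2)) := by
  intro xs
  induction xs with
  | nil => rfl
  | cons x t ih => simp [pvCombs2, ih, List.map_map]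

lemma pvCombs2_length {α : Type} (xs : List α) :
    2 * (pvCombs2 xs).length = xs.length * (xs.length - 1) := by
  induction xs with
  | nil => rfl
  | cons x t ih =>
    have hstep : (pvCombs2 (x :: t)).length = t.length + (pvCombs2 t).length := by
      simp [show pvCombs2 (x :: t) = t.map (fun y => (x, y)) ++ pvCombs2 t from rfl]
    cases hL : t.length with
    | zero =>
      have hz : (pvCombs2 t).length = 0 := by rw [hL] at ih; simpa using ih
      simp [hstep, hL, hz]
    | succ a =>
      have h2 : 2 * (pvCombs2 t).length = (a + 1) * a := by
        rw [hL] at ih; simpa using ih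
      rw [hstep, List.length_cons, hL]
      have hgoal : 2 * (a + 1 + (pvCombs2 t).length) = (a + 1 + 1) * (a + 1 + 1 - 1) := by
        simp only [Nat.add_sub_cancel]
        nlinarith [h2]
      exact hgoal

lemma pvNodup_count (xs : List (Int × Int)) (h : xs.Nodup) (p : Int × Int) :
    xs.count p = if p ∈ xs then 1 else 0 := by
  split_ifs with hp
  · have h1 := List.nodup_iff_count_le_one.mp h p
    have h2 := List.count_pos_iff.mpr hp
    omega
  · exact List.count_eq_zero.mpr hp

lemma pvRange_pairwise (a b : Int) : (PySem.List.pyRange a b 1).Pairwise (· < ·) := by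
  rw [List.pairwise_iff_getElem]
  intro i j hi hj hij
  rw [PySem.List.getElem_pyRange_one, PySem.List.getElem_pyRange_one]
  omega

-- occurrence lists of the inverted index
def pvOcc (sets : List (List Int)) (x : Int) : List Int := (pvIndex sets).getD x []

lemma pvOcc_flat (sets : List (List Int)) (x : Int) (hnd : ∀ s ∈ sets, s.Nodup) :
    pvOcc sets x = (PySem.List.enumerate sets).flatMap (fun p => if x ∈ p.2 then [p.1] else []) := by
  unfold pvOcc pvIndex
  rw [PySem.Dict.getD_foldl_modify_append]
  rw [PySem.Dict.getD_empty, List.nil_append]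
  unfold pvL0
  rw [List.filter_flatMap, List.map_flatMap]
  refine List.flatMap_congr (fun p hp => ?_)
  have hsnd : p.2 ∈ sets := by
    obtain ⟨k, hk, rfl⟩ := (PySem.List.mem_enumerate_iff sets 0 p).mp hp
    exact List.getElem_mem hk
  have hnodup : p.2.Nodup := hnd _ hsnd
  rw [List.filter_map, List.map_map]
  have : ((fun q : Int × Int => q.1 == x) ∘ fun y => (y, p.1)) = (fun y => y == x) := rfl
  rw [this, List.filter_beq]
  by_cases hx : x ∈ p.2
  · have hc1 : p.2.count x = 1 := by
      have := List.nodup_iff_count_le_one.mp hnodup x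
      have := List.count_pos_iff.mpr hx
      omega
    simp [hc1, hx]
  · simp [List.count_eq_zero.mpr hx, hx]

lemma pvOcc_mem (sets : List (List Int)) (x : Int) (hnd : ∀ s ∈ sets, s.Nodup) (i : Int) :
    i ∈ pvOcc sets x ↔ 0 ≤ i ∧ i < (sets.length : Int) ∧ x ∈ sets.getD i.toNat [] := by
  rw [pvOcc_flat sets x hnd, List.mem_flatMap]
  constructor
  · rintro ⟨p, hp, hmem⟩
    obtain ⟨k, hk, rfl⟩ := (PySem.List.mem_enumerate_iff sets 0 p).mp hp
    by_cases hx : x ∈ sets[k]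
    · simp only [hx, if_true, List.mem_singleton] at hmem
      subst hmem
      refine ⟨by omega, by omega, ?_⟩
      rw [show ((0 : Int) + (k : Int)).toNat = k by omega, List.getD_eq_getElem _ _ hk]
      exact hx
    · simp [hx] at hmem
  · rintro ⟨h0, hm, hx⟩
    refine ⟨(i, sets[i.toNat]'(by omega)), ?_, ?_⟩
    · rw [PySem.List.mem_enumerate_iff]
      exact ⟨i.toNat, by omega, by simp; omega⟩
    · rw [List.getD_eq_getElem _ _ (by omega : i.toNat < sets.length)] at hx
      simp [hx]

lemma pvOcc_pairwise (sets : List (List Int)) (x : Int) (hnd : ∀ s ∈ sets, s.Nodup) :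
    (pvOcc sets x).Pairwise (· < ·) := by
  rw [pvOcc_flat sets x hnd]
  have haux : ∀ (l : List (List Int)) (s : Int) (i : Int),
      i ∈ (PySem.List.enumerate l s).flatMap (fun p => if x ∈ p.2 then [p.1] else []) → s ≤ i := by
    intro l s i hi
    obtain ⟨p, hp, hmem⟩ := List.mem_flatMap.mp hi
    obtain ⟨k, hk, rfl⟩ := (PySem.List.mem_enumerate_iff l s p).mp hp
    by_cases hx : x ∈ l[k]
    · simp only [hx, if_true, List.mem_singleton] at hmem; omega
    · simp [hx] at hmem
  suffices h : ∀ (l : List (List Int)) (s : Int),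
      ((PySem.List.enumerate l s).flatMap (fun p => if x ∈ p.2 then [p.1] else [])).Pairwise (· < ·) from
    h sets 0
  intro l
  induction l with
  | nil => intro s; simp
  | cons hd tl ih =>
    intro s
    rw [PySem.List.enumerate_cons, List.flatMap_cons, List.pairwise_append]
    refine ⟨by split_ifs <;> simp, ih (s + 1), ?_⟩
    intro a ha b hb
    have hb' : s + 1 ≤ b := haux tl (s + 1) b hb
    have ha' : a = s := by split_ifs at ha <;> simp at ha; exact ha
    omega

-- keys of the inverted index
lemma pvIndex_keys (sets : List (List Int)) :
    (pvIndex sets).keys = PySem.Set.ofList ((pvL0 sets).map (fun q => q.1)) := by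
  unfold pvIndex
  rw [PySem.Dict.keys_foldl_modify_key (pvL0 sets) (fun q => q.1) []
    (fun _ q => (fun l => l ++ [q.2])) PySem.Dict.empty]
  rfl

lemma pvIndex_nodup_keys (sets : List (List Int)) : (pvIndex sets).keys.Nodup := by
  rw [pvIndex_keys]; exact PySem.Set.nodup_ofList _

lemma pvIndex_values (sets : List (List Int)) :
    (pvIndex sets).values = (pvIndex sets).keys.map (pvOcc sets) :=
  PySem.Dict.values_eq_map_keys _ (pvIndex_nodup_keys sets) []

lemma pvKeys_mem (sets : List (List Int)) (x : Int) :
    x ∈ (pvIndex sets).keys ↔ ∃ s ∈ sets, x ∈ s := by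
  rw [pvIndex_keys, PySem.Set.mem_ofList, List.mem_map]
  constructor
  · rintro ⟨q, hq, rfl⟩
    obtain ⟨p, hp, hq2⟩ := List.mem_flatMap.mp hq
    obtain ⟨y, hy, rfl⟩ := List.mem_map.mp hq2
    obtain ⟨k, hk, rfl⟩ := (PySem.List.mem_enumerate_iff sets 0 p).mp hp
    exact ⟨_, List.getElem_mem hk, hy⟩
  · rintro ⟨s, hs, hx⟩
    obtain ⟨k, hk, rfl⟩ := List.mem_iff_getElem.mp hs
    refine ⟨(x, (k : Int)), List.mem_flatMap.mpr ⟨((k : Int), sets[k]), ?_, ?_⟩, rfl⟩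
    · rw [PySem.List.mem_enumerate_iff]
      exact ⟨k, hk, by simp⟩
    · exact List.mem_map.mpr ⟨x, hx, rfl⟩

-- the index pairs and the two central counting facts
def pvE (m : Int) : List (Int × Int) := pvCombs2 (PySem.List.pyRange 0 m 1)

lemma pvE_nodup (m : Int) : (pvE m).Nodup := (pvCombs2_spec (pvRange_pairwise 0 m)).1

lemma pvE_mem (m : Int) (p : Int × Int) : p ∈ pvE m ↔ 0 ≤ p.1 ∧ p.1 < p.2 ∧ p.2 < m := by
  rw [pvE, (pvCombs2_spec (pvRange_pairwise 0 m)).2 p]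
  simp only [PySem.List.mem_pyRange_one]
  omega

lemma pv_sum_ite (l : List Int) (P : Int → Prop) [DecidablePred P] :
    (l.map (fun x => if P x then (1 : Nat) else 0)).sum = l.countP (fun x => decide (P x)) := by
  induction l with
  | nil => rfl
  | cons x t ih =>
    simp only [List.map_cons, List.sum_cons, List.countP_cons, ih]
    by_cases hx : P x
    · simp [hx]
      omega
    · simp [hx]

-- K3: every counted pair is a valid index pair
lemma pvL_sub (sets : List (List Int)) (hnd : ∀ s ∈ sets, s.Nodup) :
    ∀ p ∈ pvL sets, p ∈ pvE (sets.length : Int) := by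
  intro p hp
  obtain ⟨ids, hids, hpids⟩ := List.mem_flatMap.mp hp
  rw [pvIndex_values] at hids
  obtain ⟨x, _, rfl⟩ := List.mem_map.mp hids
  obtain ⟨h1, h2, h3⟩ := ((pvCombs2_spec (pvOcc_pairwise sets x hnd)).2 p).mp hpids
  rw [pvOcc_mem sets x hnd] at h1 h2
  rw [pvE_mem]
  exact ⟨h1.1, h3, h2.2.1⟩

-- K2: the pair (i, j) is counted exactly |sets[i] & sets[j]| times
lemma pvL_count (sets : List (List Int)) (hnd : ∀ s ∈ sets, s.Nodup) (p : Int × Int)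
    (hp : p ∈ pvE (sets.length : Int)) :
    (pvL sets).count p
      = (PySem.Set.inter (sets.getD p.1.toNat []) (sets.getD p.2.toNat [])).length := by
  obtain ⟨h0, hij, hm⟩ := (pvE_mem _ p).mp hp
  set si := sets.getD p.1.toNat [] with hsi
  set sj := sets.getD p.2.toNat [] with hsj
  have hsimem : si ∈ sets := by
    rw [hsi, List.getD_eq_getElem _ _ (by omega : p.1.toNat < sets.length)]
    exact List.getElem_mem _
  have hsjmem : sj ∈ sets := by
    rw [hsj, List.getD_eq_getElem _ _ (by omega : p.2.toNat < sets.length)]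
    exact List.getElem_mem _
  rw [pvL, List.count_flatMap, pvIndex_values, List.map_map]
  have hterm : ∀ x ∈ (pvIndex sets).keys,
      ((List.count p ∘ pvCombs2) ∘ pvOcc sets) x = if x ∈ si ∧ x ∈ sj then 1 else 0 := by
    intro x _
    have hocc := pvOcc_pairwise sets x hnd
    have hspec := pvCombs2_spec hocc
    rw [Function.comp_apply, Function.comp_apply, pvNodup_count _ hspec.1]
    refine if_congr ?_ rfl rfl
    rw [hspec.2 p, pvOcc_mem sets x hnd, pvOcc_mem sets x hnd, ← hsi, ← hsj]
    constructor
    · rintro ⟨⟨_, _, hx1⟩, ⟨_, _, hx2⟩, _⟩; exact ⟨hx1, hx2⟩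
    · rintro ⟨hx1, hx2⟩; exact ⟨⟨h0, by omega, hx1⟩, ⟨by omega, hm, hx2⟩, hij⟩
  rw [List.map_congr_left hterm, pv_sum_ite _ (fun x => x ∈ si ∧ x ∈ sj)]
  -- countP over the distinct elements = filter length over si
  have hXnd : (pvIndex sets).keys.Nodup := pvIndex_nodup_keys sets
  have hsind : si.Nodup := hnd _ hsimem
  have hperm : ((pvIndex sets).keys.filter (fun x => decide (x ∈ si ∧ x ∈ sj))).Perm
      (si.filter (fun x => decide (x ∈ sj))) := by
    rw [List.perm_ext_iff_of_nodup (hXnd.filter _) (hsind.filter _)]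
    intro a
    simp only [List.mem_filter, decide_eq_true_eq]
    constructor
    · rintro ⟨_, ha1, ha2⟩; exact ⟨ha1, ha2⟩
    · rintro ⟨ha1, ha2⟩
      exact ⟨(pvKeys_mem sets a).mpr ⟨si, hsimem, ha1⟩, ha1, ha2⟩
  rw [List.countP_eq_length_filter, hperm.length_eq, PySem.Set.inter]
  congr 1
  exact List.filter_congr (fun y _ => by simp)

-- the overlap list of A as a map over the index pairs
def pvF (sets : List (List Int)) (p : Int × Int) : Int :=
  (PySem.Set.inter (sets.getD p.1.toNat []) (sets.getD p.2.toNat [])).length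

lemma pv_ovs_eq (sets : List (List Int)) :
    (pvCombs2 sets).map pvOv = (pvE (sets.length : Int)).map (pvF sets) := by
  conv_lhs => rw [show sets = (PySem.List.pyRange 0 (sets.length : Int) 1).map
    (fun i => PySem.List.pyGetD sets i []) from by
      rw [show (PySem.List.pyRange 0 (sets.length : Int) 1)
          = (PySem.List.pyRange (0 : Int) (sets.length : Int)) from rfl,
        PySem.List.map_pyGetD_pyRange' sets [] (a := 0) le_rfl]
      simp]
  rw [pvCombs2_map, List.map_map]
  refine List.map_congr_left (fun p hp => ?_)
  obtain ⟨h0, hij, hm⟩ := (pvE_mem _ p).mp hp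
  simp only [Function.comp_apply, pvOv, pvF]
  rw [PySem.List.pyGetD_of_nonneg _ _ h0, PySem.List.pyGetD_of_nonneg _ _ (by omega : 0 ≤ p.2)]

lemma pv_count_map {α : Type} (l : List α) (f : α → Int) (c : Int) :
    (l.map f).count c = l.countP (fun p => f p == c) := by
  rw [List.count, List.countP_map]
  rfl

-- the encoded key is injective on valid index pairs, and counting transports along it
lemma pvEnc_inj (sets : List (List Int)) (p q : Int × Int)
    (hp : p ∈ pvE (sets.length : Int)) (hq : q ∈ pvE (sets.length : Int))
    (h : pvEnc sets p = pvEnc sets q) : p = q := by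
  obtain ⟨hp0, hp1, hp2⟩ := (pvE_mem _ p).mp hp
  obtain ⟨hq0, hq1, hq2⟩ := (pvE_mem _ q).mp hq
  have hm : 0 < (sets.length : Int) := by omega
  simp only [pvEnc] at h
  have h1 : p.1 = q.1 := by
    by_contra hne
    rcases lt_or_gt_of_ne hne with hlt | hgt
    · have hmul := mul_le_mul_of_nonneg_right (show p.1 + 1 ≤ q.1 by omega) (le_of_lt hm)
      rw [add_mul, one_mul] at hmul
      have hpb : 0 ≤ p.2 := by omega
      have hqb : q.2 < (sets.length : Int) := hq2
      linarith
    · have hmul := mul_le_mul_of_nonneg_right (show q.1 + 1 ≤ p.1 by omega) (le_of_lt hm)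
      rw [add_mul, one_mul] at hmul
      have hqb : 0 ≤ q.2 := by omega
      have hpb : p.2 < (sets.length : Int) := hp2
      linarith
  have h2 : p.2 = q.2 := by
    rw [h1] at h
    linarith
  exact Prod.ext_iff.mpr ⟨h1, h2⟩

lemma pv_count_map_injOn (l : List (Int × Int)) (f : Int × Int → Int) (b : Int × Int)
    (hb : ∀ a ∈ l, f a = f b → a = b) : (l.map f).count (f b) = l.count b := by
  induction l with
  | nil => rfl
  | cons a t ih =>
    have hab : (f a == f b) = (a == b) := by
      by_cases h : a = b
      · simp [h]
      · have : f a ≠ f b := fun heq => h (hb a List.mem_cons_self heq)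
        simp [h, this]
    simp only [List.map_cons, List.count_cons,
      ih (fun a' ha' h => hb a' (List.mem_cons_of_mem _ ha') h), hab]

lemma pvEnc_bounds (sets : List (List Int)) (p : Int × Int)
    (hp : p ∈ pvE (sets.length : Int)) :
    0 ≤ pvEnc sets p ∧ pvEnc sets p < (sets.length : Int) * (sets.length : Int) := by
  obtain ⟨hp0, hp1, hp2⟩ := (pvE_mem _ p).mp hp
  have hm : (0 : Int) ≤ (sets.length : Int) := Int.natCast_nonneg _
  have hlow : 0 ≤ p.1 * (sets.length : Int) := mul_nonneg hp0 hm
  have hup : p.1 * (sets.length : Int) ≤ ((sets.length : Int) - 1) * (sets.length : Int) :=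
    mul_le_mul_of_nonneg_right (by omega) hm
  have hexp : ((sets.length : Int) - 1) * (sets.length : Int)
      = (sets.length : Int) * (sets.length : Int) - (sets.length : Int) := by ring
  simp only [pvEnc]
  constructor
  · linarith
  · linarith

-- transports a count predicate from the flat index range to the index pairs
lemma pv_bridge (sets : List (List Int)) (hnd : ∀ s ∈ sets, s.Nodup) (P : Int → Bool)
    (hP : ∀ v, P v = true → 0 < (pvLE sets).count v) :
    (List.range (sets.length * sets.length)).countP (fun t => P ((t : Nat) : Int))
      = (pvE (sets.length : Int)).countP (fun p => P (pvEnc sets p)) := by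
  rw [show (fun t : Nat => P ((t : Nat) : Int)) = (P ∘ fun t : Nat => ((t : Nat) : Int)) from rfl,
    ← List.countP_map]
  rw [show (fun p => P (pvEnc sets p)) = (P ∘ pvEnc sets) from rfl, ← List.countP_map]
  rw [List.countP_eq_length_filter, List.countP_eq_length_filter]
  refine List.Perm.length_eq ?_
  have hRMnd : ((List.range (sets.length * sets.length)).map (fun t : Nat => ((t : Nat) : Int))).Nodup :=
    List.nodup_range.map (fun a b hab => by exact_mod_cast hab)
  have hEMnd : ((pvE (sets.length : Int)).map (pvEnc sets)).Nodup := by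
    refine (List.Nodup.map_on ?_ (pvE_nodup _))
    intro a ha b hb hab
    exact pvEnc_inj sets a b ha hb hab
  rw [List.perm_ext_iff_of_nodup (hRMnd.filter _) (hEMnd.filter _)]
  intro x
  simp only [List.mem_filter, List.mem_map, List.mem_range]
  constructor
  · rintro ⟨⟨t, ht, rfl⟩, hPx⟩
    have hcnt := hP _ hPx
    have hmem : ((t : Nat) : Int) ∈ pvLE sets := List.count_pos_iff.mp hcnt
    obtain ⟨q, hq, hqe⟩ := List.mem_map.mp hmem
    exact ⟨⟨q, pvL_sub sets hnd q hq, hqe⟩, hPx⟩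
  · rintro ⟨⟨p, hp, rfl⟩, hPx⟩
    refine ⟨⟨(pvEnc sets p).toNat, ?_, ?_⟩, hPx⟩
    · obtain ⟨hb0, hb1⟩ := pvEnc_bounds sets p hp
      have hcast : (sets.length : Int) * (sets.length : Int)
          = ((sets.length * sets.length : Nat) : Int) := by push_cast; ring
      omega
    · obtain ⟨hb0, _⟩ := pvEnc_bounds sets p hp
      omega

-- the main equivalence, slot by slot
theorem pv_main (sets : List (List Int)) (n : Int) (hnd : ∀ s ∈ sets, s.Nodup) :
    histogram_overlap_counts sets n = histogram_overlap_counts_alt sets n := by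
  rw [pvA_eq, pvB_eq]
  have hElen : (PySem.List.pyRange 0 (sets.length : Int) 1).length = sets.length := by
    rw [PySem.List.length_pyRange_one]; omega
  have hEnc_count : ∀ p ∈ pvE (sets.length : Int),
      (pvLE sets).count (pvEnc sets p) = (pvL sets).count p := by
    intro p hp
    exact pv_count_map_injOn (pvL sets) (pvEnc sets) p
      (fun a ha h => pvEnc_inj sets a p (pvL_sub sets hnd a ha) hp h)
  have hkeys : ∀ e ∈ pvLE sets, 0 ≤ e ∧
      e < ((List.replicate ((sets.length : Int) * (sets.length : Int)).toNat (0 : Int)).length : Int) := by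
    intro e he
    obtain ⟨q, hq, rfl⟩ := List.mem_map.mp he
    have hb := pvEnc_bounds sets q (pvL_sub sets hnd q hq)
    rw [List.length_replicate]
    constructor
    · exact hb.1
    · have : (0 : Int) ≤ (sets.length : Int) * (sets.length : Int) :=
        mul_nonneg (Int.natCast_nonneg _) (Int.natCast_nonneg _)
      omega
  have hcolen : (pvCoArr sets).length = sets.length * sets.length := by
    unfold pvCoArr
    rw [pvArr_fold_length, List.length_replicate]
    have hcast : (sets.length : Int) * (sets.length : Int)
        = ((sets.length * sets.length : Nat) : Int) := by push_cast; ring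
    omega
  have hcoarr : pvCoArr sets
      = (List.range (sets.length * sets.length)).map
          (fun t => (((pvLE sets).count ((t : Nat) : Int) : Nat) : Int)) := by
    apply List.ext_getElem
    · rw [hcolen, List.length_map, List.length_range]
    · intro t ht1 ht2
      have ht : t < sets.length * sets.length := by rwa [hcolen] at ht1
      rw [List.getElem_map, List.getElem_range]
      rw [← List.getD_eq_getElem _ 0 ht1]
      show (pvCoArr sets).getD t 0 = _
      unfold pvCoArr
      rw [pvArr_fold_getD _ _ t (by
          rw [List.length_replicate]
          have hcast : (sets.length : Int) * (sets.length : Int)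
              = ((sets.length * sets.length : Nat) : Int) := by push_cast; ring
          omega) hkeys]
      rw [List.getD_replicate (0 : Int) (by
          have hcast : (sets.length : Int) * (sets.length : Int)
              = ((sets.length * sets.length : Nat) : Int) := by push_cast; ring
          omega)]
      ring
  have hHlen : (pvHist sets n).length = (n + 1).toNat := by
    unfold pvHist
    rw [pvC_fold_length, List.length_replicate]
  apply List.ext_getElem
  · rw [pv_fold_length, List.length_replicate]
    split_ifs
    · rw [PySem.List.length_pySetD, hHlen]
    · rw [hHlen]
  · intro k h1 h2
    have hk : k < (n + 1).toNat := by rwa [pv_fold_length, List.length_replicate] at h1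
    have hn : 0 ≤ n := by omega
    rw [← List.getD_eq_getElem _ 0 h1, ← List.getD_eq_getElem _ 0 h2]
    rw [pv_fold_getD n _ _ k (by simp) (by simpa using hk)]
    rw [List.getD_replicate (0 : Int) (show k < (n + 1).toNat from hk)]
    rw [pv_ovs_eq, pv_count_map]
    -- B's slot: hist entry for k ≥ 1, the complement value for k = 0
    have hhist : (pvHist sets n).getD k 0
        = if 1 ≤ k then ((pvCoArr sets).count (k : Int) : Int) else 0 := by
      unfold pvHist
      rw [pvC_fold_getD n _ _ k (by rw [List.length_replicate]) (by
        rw [List.length_replicate]; exact hk)]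
      rw [List.getD_replicate (0 : Int) (show k < (n + 1).toNat from hk)]
      split_ifs <;> simp
    have hEnd := pvE_nodup (sets.length : Int)
    rcases Nat.eq_zero_or_pos k with rfl | hkpos
    · -- slot 0: the overwrite with the complement value
      rw [if_pos hn]
      have hset : (PySem.List.pySetD (pvHist sets n) 0
            (PySem.Int.floordiv ((sets.length : Int) * ((sets.length : Int) - 1)) 2
              - pvPos sets)).getD 0 0
          = PySem.Int.floordiv ((sets.length : Int) * ((sets.length : Int) - 1)) 2
              - pvPos sets := by
        rw [PySem.List.pySetD_of_nonneg _ _ le_rfl]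
        simp only [Int.toNat_zero]
        rw [List.getD_eq_getElem _ _ (by rw [List.length_set, hHlen]; simpa using hk),
          List.getElem_set_self]
      rw [hset]
      -- pos counts the index pairs with a positive co-occurrence count
      have hposP : ∀ v : Int, (decide (0 < v) : Bool) = true → 0 < v := fun v hv => by
        simpa using hv
      have hpose : pvPos sets
          = (((pvE (sets.length : Int)).countP
              (fun p => decide (0 < (((pvLE sets).count (pvEnc sets p) : Nat) : Int))) : Nat) : Int) := by
        unfold pvPos
        rw [PySem.List.foldl_ite_add_one]
        rw [hcoarr, List.countP_map]
        simp only [Function.comp_def]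
        rw [pv_bridge sets hnd (fun v => decide (0 < (((pvLE sets).count v : Nat) : Int)))
          (fun v hv => by simpa using hv)]
        simp
      have hkey0 : (pvE (sets.length : Int)).countP (fun p => pvF sets p == ((0 : Nat) : Int))
          + (pvE (sets.length : Int)).countP
              (fun p => decide (0 < (((pvLE sets).count (pvEnc sets p) : Nat) : Int)))
          = (pvE (sets.length : Int)).length := by
        rw [List.length_eq_countP_add_countP (fun p => pvF sets p == ((0 : Nat) : Int))]
        congr 1
        refine List.countP_congr (fun p hp => ?_)
        have hcnt := pvL_count sets hnd p hp
        have henc := hEnc_count p hp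
        simp only [beq_iff_eq, Nat.cast_zero, decide_eq_true_eq]
        constructor
        · intro hposv
          simp only [pvF]
          omega
        · intro hne
          simp only [pvF] at hne
          omega
      have hElen2 : 2 * (pvE (sets.length : Int)).length = sets.length * (sets.length - 1) := by
        rw [pvE, pvCombs2_length, hElen]
      have hmm : PySem.Int.floordiv ((sets.length : Int) * ((sets.length : Int) - 1)) 2
          = ((pvE (sets.length : Int)).length : Int) := by
        have hcast : (sets.length : Int) * ((sets.length : Int) - 1)
            = ((sets.length * (sets.length - 1) : Nat) : Int) := by
          cases hls : sets.length with
          | zero => simp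
          | succ l => push_cast [Nat.add_sub_cancel]; ring
        rw [hcast, show (2 : Int) = ((2 : Nat) : Int) from rfl, PySem.Int.floordiv_natCast]
        have hdiv : sets.length * (sets.length - 1) / 2 = (pvE (sets.length : Int)).length := by
          omega
        rw [hdiv]
      omega
    · -- positive slots: the co-occurrence counts
      have hselect : (if 0 ≤ n then
            PySem.List.pySetD (pvHist sets n) 0
              (PySem.Int.floordiv ((sets.length : Int) * ((sets.length : Int) - 1)) 2
                - pvPos sets)
          else pvHist sets n).getD k 0 = (pvHist sets n).getD k 0 := by
        rw [if_pos hn, PySem.List.pySetD_of_nonneg _ _ le_rfl]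
        simp only [Int.toNat_zero]
        rw [List.getD_eq_getElem?_getD, List.getElem?_set_ne (by omega),
          ← List.getD_eq_getElem?_getD]
      rw [hselect, hhist, if_pos (show 1 ≤ k by omega)]
      -- transport the count along the encoding
      have hcnt : (pvCoArr sets).count (k : Int)
          = (pvE (sets.length : Int)).countP (fun p => pvF sets p == ((k : Nat) : Int)) := by
        rw [hcoarr, pv_count_map]
        rw [pv_bridge sets hnd
          (fun v => (((pvLE sets).count v : Nat) : Int) == ((k : Nat) : Int))
          (fun v hv => by
            have : (((pvLE sets).count v : Nat) : Int) = ((k : Nat) : Int) := by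
              simpa using hv
            omega)]
        refine List.countP_congr (fun p hp => ?_)
        have henc := hEnc_count p hp
        have hLc := pvL_count sets hnd p hp
        simp only [beq_iff_eq, pvF]
        omega
      rw [hcnt]
      omega
  
-- ===== VERDICT (by name: the statement is the Claim_ definition above) =====
theorem histogram_overlap_counts_spec : Claim_equal_histogram_overlap_counts := by
  intro sets n _ hpre
  unfold Spec_histogram_overlap_counts
  exact pv_main sets n hpre
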